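-- pv_equiv track=rewrite | github.com/tommasomncttn/NAS4CNN | evolutionaryAlgorithm/utilsEA.py | check_validity_genotype
-- ===== SOURCE A (Python) =====
-- def check_validity_genotype(input_list):
--   list_lengths = [3, 2, 5, 4, 10]
--
--   if len(input_list) != sum(list_lengths):
--       return False
--
--   index = 0
--   for length in list_lengths:
--       sublist = input_list[index:index+length]
--       sampled_values = list(range(length))
--
--       if not all(value in sampled_values for value in sublist):
--           return False
--
--       index += length
--
--   return True
-- ===== SOURCE B (Python) =====
-- def check_validity_genotype(input_list):
--     limits = [n for n in [3, 2, 5, 4, 10] for _ in range(n)]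
--     if len(input_list) != len(limits):
--         return False
--     return all(v in range(limit) for v, limit in zip(input_list, limits))
-- ===== Notes on version B (the rewrite author's own statement) =====
-- stated objective: simpler
-- what changed: Replaced the index/slice loop over segment lengths by a precomputed flat list of 24 per-position upper bounds and a single zip pass with no slicing or index bookkeeping.
import Mathlib
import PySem

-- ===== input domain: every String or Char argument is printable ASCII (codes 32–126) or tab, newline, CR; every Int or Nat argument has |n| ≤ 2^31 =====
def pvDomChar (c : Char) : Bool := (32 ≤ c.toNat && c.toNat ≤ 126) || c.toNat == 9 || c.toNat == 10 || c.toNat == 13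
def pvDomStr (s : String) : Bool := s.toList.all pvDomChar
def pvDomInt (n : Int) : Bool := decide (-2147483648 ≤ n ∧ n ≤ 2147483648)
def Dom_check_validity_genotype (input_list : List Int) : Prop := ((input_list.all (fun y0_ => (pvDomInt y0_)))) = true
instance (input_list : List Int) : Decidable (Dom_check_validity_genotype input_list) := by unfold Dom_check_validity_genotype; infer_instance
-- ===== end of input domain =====

-- B replaces A's index/slice loop over segment lengths by a precomputed flat list of
-- 24 per-position upper bounds and a single zip pass (objective: simpler).

-- ===== PORT A =====
-- the for-loop over list_lengths, carrying the running index; early 'return False' = result false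
def check_validity_genotype_loopA (input_list : List Int) : List Int → Int → Bool
  | [], _ => true
  | length :: rest, index =>
    let sublist := PySem.List.slice input_list (some index) (some (index + length))
    let sampled_values := PySem.List.pyRange 0 length 1
    if !(sublist.all fun value => decide (value ∈ sampled_values)) then false
    else check_validity_genotype_loopA input_list rest (index + length)

def check_validity_genotype (input_list : List Int) : Bool :=
  let list_lengths : List Int := [3, 2, 5, 4, 10]
  if (input_list.length : Int) ≠ list_lengths.sum then false
  else check_validity_genotype_loopA input_list list_lengths 0

-- ===== PORT B =====
-- limits = [n for n in [3,2,5,4,10] for _ in range(n)]; then one zip pass, 'v in range(limit)'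
def check_validity_genotype_alt (input_list : List Int) : Bool :=
  let limits : List Int :=
    ([3, 2, 5, 4, 10] : List Int).flatMap fun n => (PySem.List.pyRange 0 n 1).map fun _ => n
  if input_list.length ≠ limits.length then false
  else (input_list.zip limits).all fun p => decide (p.1 ∈ PySem.List.pyRange 0 p.2 1)

-- ===== PRECONDITION & SPEC =====
def Spec_check_validity_genotype (input_list : List Int) (out : Bool) : Prop := out = check_validity_genotype_alt input_list
instance (input_list : List Int) (out : Bool) : Decidable (Spec_check_validity_genotype input_list out) := by unfold Spec_check_validity_genotype; infer_instance

-- ===== CLAIM (what is proved, stated in full; the proofs are below) =====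
def Claim_equal_check_validity_genotype : Prop := ∀ (input_list : List Int), Dom_check_validity_genotype input_list → Spec_check_validity_genotype input_list (check_validity_genotype input_list)

-- ===== LEMMAS AND PROOFS =====
set_option maxHeartbeats 2000000 in
theorem check_validity_genotype_eq (l : List Int) :
    check_validity_genotype l = check_validity_genotype_alt l := by
  rcases l with _ | ⟨x1, l⟩
  · decide
  rcases l with _ | ⟨x2, l⟩
  · simp [check_validity_genotype, check_validity_genotype_alt]
  rcases l with _ | ⟨x3, l⟩
  · simp [check_validity_genotype, check_validity_genotype_alt]
  rcases l with _ | ⟨x4, l⟩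
  · simp [check_validity_genotype, check_validity_genotype_alt]
  rcases l with _ | ⟨x5, l⟩
  · simp [check_validity_genotype, check_validity_genotype_alt]
  rcases l with _ | ⟨x6, l⟩
  · simp [check_validity_genotype, check_validity_genotype_alt]
  rcases l with _ | ⟨x7, l⟩
  · simp [check_validity_genotype, check_validity_genotype_alt]
  rcases l with _ | ⟨x8, l⟩
  · simp [check_validity_genotype, check_validity_genotype_alt]
  rcases l with _ | ⟨x9, l⟩
  · simp [check_validity_genotype, check_validity_genotype_alt]
  rcases l with _ | ⟨x10, l⟩
  · simp [check_validity_genotype, check_validity_genotype_alt]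
  rcases l with _ | ⟨x11, l⟩
  · simp [check_validity_genotype, check_validity_genotype_alt]
  rcases l with _ | ⟨x12, l⟩
  · simp [check_validity_genotype, check_validity_genotype_alt]
  rcases l with _ | ⟨x13, l⟩
  · simp [check_validity_genotype, check_validity_genotype_alt]
  rcases l with _ | ⟨x14, l⟩
  · simp [check_validity_genotype, check_validity_genotype_alt]
  rcases l with _ | ⟨x15, l⟩
  · simp [check_validity_genotype, check_validity_genotype_alt]
  rcases l with _ | ⟨x16, l⟩
  · simp [check_validity_genotype, check_validity_genotype_alt]
  rcases l with _ | ⟨x17, l⟩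
  · simp [check_validity_genotype, check_validity_genotype_alt]
  rcases l with _ | ⟨x18, l⟩
  · simp [check_validity_genotype, check_validity_genotype_alt]
  rcases l with _ | ⟨x19, l⟩
  · simp [check_validity_genotype, check_validity_genotype_alt]
  rcases l with _ | ⟨x20, l⟩
  · simp [check_validity_genotype, check_validity_genotype_alt]
  rcases l with _ | ⟨x21, l⟩
  · simp [check_validity_genotype, check_validity_genotype_alt]
  rcases l with _ | ⟨x22, l⟩
  · simp [check_validity_genotype, check_validity_genotype_alt]
  rcases l with _ | ⟨x23, l⟩
  · simp [check_validity_genotype, check_validity_genotype_alt]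
  rcases l with _ | ⟨x24, l⟩
  · simp [check_validity_genotype, check_validity_genotype_alt]
  rcases l with _ | ⟨x25, l⟩
  · -- exactly 24 elements: both sides reduce to the same chain of range-membership tests
    have hif : ∀ (c r : Bool), (if !c then false else r) = (c && r) := by decide
    simp only [check_validity_genotype, check_validity_genotype_alt,
      check_validity_genotype_loopA, hif]
    norm_num [PySem.List.slice_toNat]
    simp [Bool.and_assoc]
  · -- more than 24 elements: both length tests fail
    simp [check_validity_genotype, check_validity_genotype_alt]
    omega

-- ===== VERDICT (by name: the statement is the Claim_ definition above) =====
theorem check_validity_genotype_spec : Claim_equal_check_validity_genotype := by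
  intro l _
  exact check_validity_genotype_eq l
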